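-- pv_equiv track=rewrite | github.com/fernando9017/HTA-Reimbursement-Price | app/services/germany_hta.py | _filter_current
-- ===== SOURCE A (Python) =====
-- from collections import defaultdict
--
-- def _filter_current(decisions: list[dict]) -> list[dict]:
--     """Keep only the most recent decision per indication.
--
--     Groups by indication text (AWG), and for each group keeps only the
--     decision with the latest date, effectively filtering out superseded
--     re-assessments. If two decisions share the same date but differ in
--     patient group, both are kept (they represent distinct subpopulations
--     of a single assessment).
--     """
--     # Group by indication
--     by_indication: dict[str, list[dict]] = defaultdict(list)
--     for dec in decisions:
--         ind = dec.get("indication", "").strip()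
--         by_indication[ind].append(dec)
--
--     current: list[dict] = []
--     for ind, group in by_indication.items():
--         if not group:
--             continue
--
--         # Find the latest decision_date for this indication
--         latest_date = max(
--             (d.get("decision_date", "") for d in group),
--             default="",
--         )
--
--         # Keep all entries with that latest date (may be multiple subpopulations)
--         for dec in group:
--             if dec.get("decision_date", "") == latest_date:
--                 current.append(dec)
--
--     return current
-- ===== SOURCE B (Python) =====
-- def _filter_current(decisions: list[dict]) -> list[dict]:
--     """Keep only the most recent decision per indication (single pass)."""
--     # stripped indication -> (latest date seen, decisions carrying that date, in order)
--     latest: dict[str, tuple[str, list[dict]]] = {}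
--     for dec in decisions:
--         ind = dec.get("indication", "").strip()
--         date = dec.get("decision_date", "")
--         entry = latest.get(ind)
--         if entry is None:
--             latest[ind] = (date, [dec])
--         else:
--             best, kept = entry
--             if date > best:
--                 latest[ind] = (date, [dec])
--             elif date == best:
--                 kept.append(dec)
--     current: list[dict] = []
--     for _, kept in latest.values():
--         current.extend(kept)
--     return current
-- ===== Notes on version B (the rewrite author's own statement) =====
-- stated objective: simpler
-- what changed: B replaces A's two-phase design (group all decisions per indication, then per group compute max date and filter) by a single pass that maintains per indication only the best date and the decisions carrying it, flattening the dict at the end.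
import Mathlib
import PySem

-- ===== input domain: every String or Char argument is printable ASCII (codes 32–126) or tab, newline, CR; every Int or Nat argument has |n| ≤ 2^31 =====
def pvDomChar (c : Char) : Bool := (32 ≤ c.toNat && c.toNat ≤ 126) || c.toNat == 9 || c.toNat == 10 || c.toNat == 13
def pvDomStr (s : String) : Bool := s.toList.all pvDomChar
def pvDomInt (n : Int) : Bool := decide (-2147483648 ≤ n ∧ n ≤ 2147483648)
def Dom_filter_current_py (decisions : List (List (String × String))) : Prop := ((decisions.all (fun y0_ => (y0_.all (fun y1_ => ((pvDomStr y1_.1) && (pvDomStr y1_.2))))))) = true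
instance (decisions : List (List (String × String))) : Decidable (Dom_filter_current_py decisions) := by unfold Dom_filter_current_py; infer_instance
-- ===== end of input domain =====

-- B fuses A's three passes (group, max date, filter) into one pass that keeps, per indication,
-- the best date together with the decisions carrying it; objective: simpler, same cost class.

-- dec.get(k, dflt) on a Python dict (association list, first match)
def pvGetD (dec : List (String × String)) (k dflt : String) : String :=
  (PySem.Dict.mk dec).getD k dflt

-- dec.get("indication", "").strip()
def pvInd (dec : List (String × String)) : String :=
  PySem.Str.strip (pvGetD dec "indication" "")

-- dec.get("decision_date", "")
def pvDate (dec : List (String × String)) : String :=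
  pvGetD dec "decision_date" ""

-- ===== PORT A =====
-- loop body of A's grouping loop: by_indication[ind].append(dec)
def pvStepA (d : PySem.Dict String (List (List (String × String)))) (dec : List (String × String)) : PySem.Dict String (List (List (String × String))) :=
  d.modify (pvInd dec) [] (fun g => g ++ [dec])

def filter_current_py (decisions : List (List (String × String))) : List (List (String × String)) :=
  let by_indication := decisions.foldl pvStepA PySem.Dict.empty
  by_indication.items.foldl (fun current p =>
    if p.2 = [] then current
    else
      let latest := (PySem.List.max? (p.2.map pvDate) (fun x => x)).getD ""
      current ++ p.2.filter (fun dec => pvDate dec == latest)) []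

-- ===== PORT B =====
-- loop body of B's single pass (the in-place kept.append is ported as re-inserting the extended list)
def pvStepB (d : PySem.Dict String (String × List (List (String × String)))) (dec : List (String × String)) : PySem.Dict String (String × List (List (String × String))) :=
  let ind := pvInd dec
  let date := pvDate dec
  match d.get? ind with
  | none => d.insert ind (date, [dec])
  | some (best, kept) =>
    if best < date then d.insert ind (date, [dec])
    else if date == best then d.insert ind (best, kept ++ [dec])
    else d

def filter_current_py_alt (decisions : List (List (String × String))) : List (List (String × String)) :=
  let latest := decisions.foldl pvStepB PySem.Dict.empty
  latest.items.foldl (fun current p => current ++ p.2.2) []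

-- ===== PRECONDITION & SPEC =====
def Spec_filter_current_py (decisions : List (List (String × String))) (out : List (List (String × String))) : Prop := out = filter_current_py_alt decisions
instance (decisions : List (List (String × String))) (out : List (List (String × String))) : Decidable (Spec_filter_current_py decisions out) := by unfold Spec_filter_current_py; infer_instance

-- ===== CLAIM (what is proved, stated in full; the proofs are below) =====
def Claim_equal_filter_current_py : Prop := ∀ (decisions : List (List (String × String))), Dom_filter_current_py decisions → Spec_filter_current_py decisions (filter_current_py decisions)

-- ===== LEMMAS AND PROOFS =====

-- latest date of a group (Python's max(..., default=""))
def pvBest (g : List (List (String × String))) : String :=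
  (PySem.List.max? (g.map pvDate) (fun x => x)).getD ""

-- the decisions of a group carrying the latest date
def pvKeep (g : List (List (String × String))) : List (List (String × String)) :=
  g.filter (fun dec => pvDate dec == pvBest g)

-- what B stores for a group A stores as g
def pvPack (g : List (List (String × String))) : String × List (List (String × String)) :=
  (pvBest g, pvKeep g)

-- invariant tying A's dict to B's dict during the input pass
def pvInv (d : PySem.Dict String (List (List (String × String)))) (d' : PySem.Dict String (String × List (List (String × String)))) : Prop :=
  d'.items = d.items.map (fun p => (p.1, pvPack p.2)) ∧ d.keys.Nodup ∧ ∀ p ∈ d.items, p.2 ≠ []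

theorem pv_pair_uniq {α β : Type} {l : List (α × β)} (hnd : (l.map Prod.fst).Nodup)
    {a b : α × β} (h1 : a ∈ l) (h2 : b ∈ l) (h : a.1 = b.1) : a = b := by
  induction l with
  | nil => cases h1
  | cons x t ih =>
    simp only [List.map_cons, List.nodup_cons] at hnd
    rcases List.mem_cons.1 h1 with rfl | h1' <;> rcases List.mem_cons.1 h2 with rfl | h2'
    · rfl
    · exact absurd (h ▸ List.mem_map_of_mem (f := Prod.fst) h2') hnd.1
    · exact absurd (h ▸ List.mem_map_of_mem (f := Prod.fst) h1') hnd.1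
    · exact ih hnd.2 h1' h2'

theorem pv_modify_eq_insert (d : PySem.Dict String (List (List (String × String)))) (k : String)
    (f : List (List (String × String)) → List (List (String × String))) :
    d.modify k [] f = d.insert k (f (d.getD k [])) := rfl

theorem pv_keys_eq_map (d : PySem.Dict String (List (List (String × String)))) :
    d.keys = d.items.map Prod.fst := rfl

theorem pv_keys_eq_map' (d : PySem.Dict String (String × List (List (String × String)))) :
    d.keys = d.items.map Prod.fst := rfl

theorem pvBest_single (dec : List (String × String)) : pvBest [dec] = pvDate dec := by
  simp [pvBest, PySem.List.max?_id_cons]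

theorem pvKeep_single (dec : List (String × String)) : pvKeep [dec] = [dec] := by
  simp [pvKeep, pvBest_single]

theorem pvBest_append {g : List (List (String × String))} (hg : g ≠ []) (dec : List (String × String)) :
    pvBest (g ++ [dec]) = max (pvBest g) (pvDate dec) := by
  obtain ⟨x, t, rfl⟩ := List.exists_cons_of_ne_nil hg
  simp [pvBest, PySem.List.max?_id_cons, List.foldl_append]

theorem pv_le_best {g : List (List (String × String))} (hg : g ≠ []) {y : List (String × String)}
    (hy : y ∈ g) : pvDate y ≤ pvBest g := by
  cases hm : PySem.List.max? (g.map pvDate) (fun s => s) with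
  | none =>
    exact absurd (List.map_eq_nil_iff.mp ((PySem.List.max?_eq_none_iff _ _).mp hm)) hg
  | some m =>
    have := PySem.List.max?_isMax hm (pvDate y) (List.mem_map_of_mem hy)
    simpa [pvBest, hm] using this

theorem pvPack_append_lt {g : List (List (String × String))} (hg : g ≠ []) {dec : List (String × String)}
    (h : pvDate dec < pvBest g) : pvPack (g ++ [dec]) = pvPack g := by
  have hb : pvBest (g ++ [dec]) = pvBest g := by
    rw [pvBest_append hg, max_eq_left h.le]
  simp [pvPack, pvKeep, hb, List.filter_append, h.ne]

theorem pvPack_append_eq {g : List (List (String × String))} (hg : g ≠ []) {dec : List (String × String)}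
    (h : pvDate dec = pvBest g) : pvPack (g ++ [dec]) = (pvBest g, pvKeep g ++ [dec]) := by
  have hb : pvBest (g ++ [dec]) = pvBest g := by
    rw [pvBest_append hg, h, max_self]
  simp [pvPack, pvKeep, hb, List.filter_append, h]

theorem pvPack_append_gt {g : List (List (String × String))} (hg : g ≠ []) {dec : List (String × String)}
    (h : pvBest g < pvDate dec) : pvPack (g ++ [dec]) = (pvDate dec, [dec]) := by
  have hb : pvBest (g ++ [dec]) = pvDate dec := by
    rw [pvBest_append hg, max_eq_right h.le]
  have hfil : g.filter (fun y => pvDate y == pvDate dec) = [] := by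
    rw [List.filter_eq_nil_iff]
    intro y hy hbeq
    exact absurd (eq_of_beq hbeq) (ne_of_lt (lt_of_le_of_lt (pv_le_best hg hy) h))
  simp [pvPack, pvKeep, hb, List.filter_append, hfil]

theorem pv_step_inv {d d'} (h : pvInv d d') (dec : List (String × String)) :
    pvInv (pvStepA d dec) (pvStepB d' dec) := by
  obtain ⟨hitems, hnd, hne⟩ := h
  have hkeys' : d'.keys = d.keys := by
    rw [pv_keys_eq_map', pv_keys_eq_map, hitems, List.map_map]; rfl
  cases hc : d.contains (pvInd dec) with
  | false =>
    have hcB : d'.contains (pvInd dec) = false := by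
      rw [PySem.Dict.contains_eq_isSome_get?,
        (PySem.Dict.get?_eq_none_iff_not_mem_keys d' (pvInd dec)).mpr
          (by rw [hkeys']
              exact fun hm => absurd ((PySem.Dict.contains_iff_mem_keys d _).mpr hm) (by simp [hc]))]
      rfl
    have hgB : d'.get? (pvInd dec) = none := by
      rw [← Option.not_isSome_iff_eq_none, ← PySem.Dict.contains_eq_isSome_get?, hcB]; simp
    have hA : pvStepA d dec = d.insert (pvInd dec) [dec] := by
      rw [pvStepA, pv_modify_eq_insert, PySem.Dict.getD_of_not_contains d [] hc]; rfl
    have hB : pvStepB d' dec = d'.insert (pvInd dec) (pvDate dec, [dec]) := by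
      rw [pvStepB]; rw [hgB]
    refine ⟨?_, ?_, ?_⟩
    · rw [hA, hB, PySem.Dict.items_insert_of_not_contains d _ hc,
        PySem.Dict.items_insert_of_not_contains d' _ hcB, hitems, List.map_append]
      simp [pvPack, pvBest_single, pvKeep_single]
    · rw [hA, PySem.Dict.keys_insert_of_not_contains d _ hc]
      exact List.Nodup.append hnd (List.nodup_singleton _)
        (by simpa using fun hm => absurd ((PySem.Dict.contains_iff_mem_keys d _).mpr hm) (by simp [hc]))
    · rw [hA, PySem.Dict.items_insert_of_not_contains d _ hc]
      intro p hp
      rcases List.mem_append.mp hp with hp | hp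
      · exact hne p hp
      · simp at hp; subst hp; simp
  | true =>
    obtain ⟨g, hget⟩ : ∃ g, d.get? (pvInd dec) = some g := by
      have := PySem.Dict.contains_eq_isSome_get? d (pvInd dec)
      rw [hc] at this
      exact Option.isSome_iff_exists.mp this.symm
    have hmem : (pvInd dec, g) ∈ d.items := PySem.Dict.mem_items_of_get?_eq_some d hget
    have hgne : g ≠ [] := hne _ hmem
    have hA : pvStepA d dec = d.insert (pvInd dec) (g ++ [dec]) := by
      rw [pvStepA, pv_modify_eq_insert, PySem.Dict.getD_of_get?_eq_some d [] hget]
    have hnd' : d'.keys.Nodup := by rw [hkeys']; exact hnd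
    have hmem' : (pvInd dec, pvPack g) ∈ d'.items := by
      rw [hitems]
      exact List.mem_map_of_mem (f := fun p => (p.1, pvPack p.2)) hmem
    have hget' : d'.get? (pvInd dec) = some (pvBest g, pvKeep g) :=
      PySem.Dict.get?_of_mem_items d' hmem' hnd'
    have hcB : d'.contains (pvInd dec) = true := by
      rw [PySem.Dict.contains_eq_isSome_get?, hget']; rfl
    have hAitems : (pvStepA d dec).items =
        d.items.map (fun p => if (p.1 == pvInd dec) = true then (pvInd dec, g ++ [dec]) else p) := by
      rw [hA, PySem.Dict.items_insert_of_contains d _ hc]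
    have hAkeys : (pvStepA d dec).keys.Nodup := by
      rw [hA, PySem.Dict.keys_insert_of_contains d _ hc]; exact hnd
    have hAne : ∀ p ∈ (pvStepA d dec).items, p.2 ≠ [] := by
      rw [hAitems]
      intro p hp
      obtain ⟨q, hq, rfl⟩ := List.mem_map.mp hp
      by_cases hqk : (q.1 == pvInd dec) = true
      · simp [hqk]
      · simp only [hqk]; exact hne q hq
    have hfix : ∀ p ∈ d.items, (p.1 == pvInd dec) = true → p = (pvInd dec, g) := by
      intro p hp hpk
      exact pv_pair_uniq (by rw [← pv_keys_eq_map]; exact hnd) hp hmem (eq_of_beq hpk)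
    have key_items : ∀ (v : String × List (List (String × String))),
        v = pvPack (g ++ [dec]) →
        (d'.insert (pvInd dec) v).items = (pvStepA d dec).items.map (fun p => (p.1, pvPack p.2)) := by
      intro v hv
      rw [PySem.Dict.items_insert_of_contains d' _ hcB, hitems, hAitems,
        List.map_map, List.map_map]
      refine List.map_congr_left ?_
      intro p hp
      by_cases hpk : (p.1 == pvInd dec) = true
      · have := hfix p hp hpk
        subst this
        simp [hv]
      · simp [Function.comp, hpk]
    have hB : pvStepB d' dec =
        (if pvBest g < pvDate dec then d'.insert (pvInd dec) (pvDate dec, [dec])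
         else if (pvDate dec == pvBest g) = true then d'.insert (pvInd dec) (pvBest g, pvKeep g ++ [dec])
         else d') := by
      rw [pvStepB]; rw [hget']
    by_cases h1 : pvBest g < pvDate dec
    · refine ⟨?_, hAkeys, hAne⟩
      rw [hB, if_pos h1]
      exact key_items _ (pvPack_append_gt hgne h1).symm
    · by_cases h2 : (pvDate dec == pvBest g) = true
      · refine ⟨?_, hAkeys, hAne⟩
        rw [hB, if_neg h1, if_pos h2]
        exact key_items _ (pvPack_append_eq hgne (eq_of_beq h2)).symm
      · refine ⟨?_, hAkeys, hAne⟩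
        rw [hB, if_neg h1, if_neg h2, hitems, hAitems, List.map_map]
        refine (List.map_congr_left ?_).symm
        intro p hp
        by_cases hpk : (p.1 == pvInd dec) = true
        · have := hfix p hp hpk
          subst this
          have hlt : pvDate dec < pvBest g := by
            rcases lt_or_eq_of_le (not_lt.mp h1) with h | h
            · exact h
            · exact absurd (beq_iff_eq.mpr h) h2
          simp [Function.comp, pvPack_append_lt hgne hlt]
        · simp [Function.comp, hpk]

theorem pv_fold_inv (l : List (List (String × String))) :
    ∀ d d', pvInv d d' → pvInv (l.foldl pvStepA d) (l.foldl pvStepB d') := by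
  induction l with
  | nil => intro d d' h; exact h
  | cons x t ih => intro d d' h; exact ih _ _ (pv_step_inv h x)

theorem pv_inv_empty : pvInv PySem.Dict.empty PySem.Dict.empty := by
  refine ⟨rfl, ?_, ?_⟩ <;> simp [PySem.Dict.empty, PySem.Dict.keys]

theorem pv_final (items : List (String × List (List (String × String))))
    (h : ∀ p ∈ items, p.2 ≠ []) : ∀ acc : List (List (String × String)),
    items.foldl (fun current p =>
      if p.2 = [] then current
      else
        let latest := (PySem.List.max? (p.2.map pvDate) (fun x => x)).getD ""
        current ++ p.2.filter (fun dec => pvDate dec == latest)) acc =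
    items.foldl (fun current p => current ++ ((fun q => (q.1, pvPack q.2)) p).2.2) acc := by
  induction items with
  | nil => intro acc; rfl
  | cons p t ih =>
    intro acc
    have hp : p.2 ≠ [] := h p (List.mem_cons_self ..)
    simp only [List.foldl_cons, if_neg hp]
    exact ih (fun q hq => h q (List.mem_cons_of_mem _ hq)) _

-- ===== VERDICT (by name: the statement is the Claim_ definition above) =====
theorem filter_current_py_spec : Claim_equal_filter_current_py := by
  intro decisions _
  unfold Spec_filter_current_py filter_current_py filter_current_py_alt
  obtain ⟨hitems, hnd, hne⟩ := pv_fold_inv decisions _ _ pv_inv_empty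
  show (List.foldl pvStepA PySem.Dict.empty decisions).items.foldl _ [] =
    (List.foldl pvStepB PySem.Dict.empty decisions).items.foldl _ []
  rw [hitems, List.foldl_map]
  exact pv_final _ hne []
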